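-- pv_equiv track=rewrite | github.com/neptyneco/neptyne-kernel | kernel/formulas/text_formatter/parser.py | parse_milliseconds
-- ===== SOURCE A (Python) =====
-- def parse_milliseconds(tokens: list[str]) -> list[str]:
--     # if tokens form .0 through .000.., combine to single subsecond token
--     result = []
--     i = 0
--     while i < len(tokens):
--         token = tokens[i]
--         if token == ".":
--             zeros = 0
--             while i + 1 < len(tokens) and tokens[i + 1] == "0":
--                 i += 1
--                 zeros += 1
--
--             if zeros > 0:
--                 result.append("." + "".join(["0"] * zeros))
--             else:
--                 result.append(".")
--         else:
--             result.append(token)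
--         i += 1
--     return result
-- ===== SOURCE B (Python) =====
-- def parse_milliseconds(tokens: list[str]) -> list[str]:
--     # One flat pass with a pending subsecond buffer instead of index lookahead.
--     result = []
--     buf = None
--     for token in tokens:
--         if token == ".":
--             if buf is not None:
--                 result.append(buf)
--             buf = "."
--         elif token == "0" and buf is not None:
--             buf = buf + "0"
--         else:
--             if buf is not None:
--                 result.append(buf)
--                 buf = None
--             result.append(token)
--     if buf is not None:
--         result.append(buf)
--     return result
-- ===== Notes on version B (the rewrite author's own statement) =====
-- stated objective: alternative
-- what changed: Replaces the index-based while loop with an inner lookahead scan by a single flat for-loop over the tokens that lazily accumulates a pending '.000..' buffer and flushes it on a non-'0' token or at the end.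
import Mathlib
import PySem

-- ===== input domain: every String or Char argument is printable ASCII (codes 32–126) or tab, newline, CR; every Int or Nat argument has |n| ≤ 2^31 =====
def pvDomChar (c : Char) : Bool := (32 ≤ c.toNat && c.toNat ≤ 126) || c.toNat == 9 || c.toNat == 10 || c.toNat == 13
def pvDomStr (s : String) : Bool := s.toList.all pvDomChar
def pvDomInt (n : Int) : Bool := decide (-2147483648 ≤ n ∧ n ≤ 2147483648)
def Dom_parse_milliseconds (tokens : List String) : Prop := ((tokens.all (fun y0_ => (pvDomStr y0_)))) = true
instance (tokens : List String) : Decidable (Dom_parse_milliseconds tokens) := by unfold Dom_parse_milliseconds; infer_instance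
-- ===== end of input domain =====

-- B replaces A's index-based lookahead (inner while counting zeros) by one flat pass with a
-- pending subsecond buffer that is flushed lazily; same result, alternative decomposition.

-- ===== PORT A =====
-- inner `while i + 1 < len(tokens) and tokens[i+1] == "0"` loop: returns the number of zeros consumed
def pmA_zeros (tokens : List String) (i : Nat) : Nat :=
  if _h : i + 1 < tokens.length ∧ tokens.getD (i + 1) "" = "0" then
    pmA_zeros tokens (i + 1) + 1
  else 0
termination_by tokens.length - i

-- outer `while i < len(tokens)` loop of A
def pmA_loop (tokens : List String) (i : Nat) (result : List String) : List String :=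
  if _h : i < tokens.length then
    let token := tokens.getD i ""
    if token = "." then
      let zeros := pmA_zeros tokens i
      pmA_loop tokens (i + zeros + 1)
        (result ++ [if zeros > 0 then "." ++ String.join (List.replicate zeros "0") else "."])
    else
      pmA_loop tokens (i + 1) (result ++ [token])
  else result
termination_by tokens.length - i

def parse_milliseconds (tokens : List String) : List String :=
  pmA_loop tokens 0 []

-- ===== PORT B =====
-- flush the pending buffer (the two `if buf is not None: result.append(buf)` lines of B)
def pmB_flush (st : List String × Option String) : List String :=
  match st.2 with
  | some b => st.1 ++ [b]
  | none => st.1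

-- one iteration of B's for-loop
def pmB_step (st : List String × Option String) (token : String) : List String × Option String :=
  if token = "." then (pmB_flush st, some ".")
  else if token = "0" ∧ st.2.isSome then (st.1, st.2.map (fun b => b ++ "0"))
  else (pmB_flush st ++ [token], none)

def parse_milliseconds_alt (tokens : List String) : List String :=
  pmB_flush (tokens.foldl pmB_step ([], none))

-- ===== PRECONDITION & SPEC =====
def Spec_parse_milliseconds (tokens : List String) (out : List String) : Prop := out = parse_milliseconds_alt tokens
instance (tokens : List String) (out : List String) : Decidable (Spec_parse_milliseconds tokens out) := by unfold Spec_parse_milliseconds; infer_instance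

-- ===== CLAIM (what is proved, stated in full; the proofs are below) =====
def Claim_equal_parse_milliseconds : Prop := ∀ (tokens : List String), Dom_parse_milliseconds tokens → Spec_parse_milliseconds tokens (parse_milliseconds tokens)

-- ===== LEMMAS AND PROOFS =====

-- the string of n zeros, as A builds it
def pvZstr (n : Nat) : String := String.join (List.replicate n "0")

-- length of the leading run of "0" tokens
def pvRun : List String → Nat
  | [] => 0
  | t :: r => if t = "0" then pvRun r + 1 else 0

-- common list-level description of both programs' output
def pvComb : List String → List String
  | [] => []
  | t :: r =>
    if t = "." then
      ("." ++ pvZstr (pvRun r)) :: pvComb (r.drop (pvRun r))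
    else t :: pvComb r
termination_by l => l.length
decreasing_by
  · simp
  · simp

theorem pvZstr_zero : pvZstr 0 = "" := rfl

theorem pvFoldlAppend (l : List String) : ∀ s : String, l.foldl (· ++ ·) s = s ++ l.foldl (· ++ ·) "" := by
  induction l with
  | nil => intro s; simp
  | cons a r ih =>
    intro s
    simp only [List.foldl_cons]
    rw [ih (s ++ a), ih ("" ++ a), String.empty_append, String.append_assoc]

theorem pvJoin_cons (s : String) (l : List String) : String.join (s :: l) = s ++ String.join l := by
  simp only [String.join, List.foldl_cons, String.empty_append]
  exact pvFoldlAppend l s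

theorem pvZstr_cons (n : Nat) : pvZstr (n + 1) = "0" ++ pvZstr n := by
  simp only [pvZstr, List.replicate_succ, pvJoin_cons]

theorem pvZstr_swap (n : Nat) : "0" ++ pvZstr n = pvZstr n ++ "0" := by
  induction n with
  | zero => rw [pvZstr_zero, String.append_empty, String.empty_append]
  | succ n ih => rw [pvZstr_cons n, String.append_assoc, ih]

theorem pvZstr_succ (n : Nat) : pvZstr (n + 1) = pvZstr n ++ "0" :=
  (pvZstr_cons n).trans (pvZstr_swap n)

-- reduction lemmas for one step of B's loop
theorem pmB_step_dot_none (res : List String) :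
    pmB_step (res, none) "." = (res, some ".") := by
  simp [pmB_step, pmB_flush]

theorem pmB_step_dot_some (res : List String) (b : String) :
    pmB_step (res, some b) "." = (res ++ [b], some ".") := by
  simp [pmB_step, pmB_flush]

theorem pmB_step_zero_some (res : List String) (b : String) :
    pmB_step (res, some b) "0" = (res, some (b ++ "0")) := by
  simp [pmB_step]

theorem pmB_step_other_none (res : List String) (t : String) (h1 : t ≠ ".") :
    pmB_step (res, none) t = (res ++ [t], none) := by
  simp [pmB_step, pmB_flush, h1]

theorem pmB_step_other_some (res : List String) (b t : String) (h1 : t ≠ ".") (h2 : t ≠ "0") :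
    pmB_step (res, some b) t = (res ++ [b] ++ [t], none) := by
  simp [pmB_step, pmB_flush, h1, h2]

theorem pvRun_le (l : List String) : pvRun l ≤ l.length := by
  induction l with
  | nil => simp [pvRun]
  | cons t r ih =>
    simp only [pvRun]
    split
    · simp only [List.length_cons]; omega
    · simp only [List.length_cons]; omega

-- B's loop invariant: processing l from a flushed state appends pvComb l;
-- from a pending buffer "." ++ zeros k it first absorbs the leading zero run.
theorem pmB_inv : ∀ (n : Nat) (l : List String), l.length ≤ n →
    (∀ res : List String, pmB_flush (l.foldl pmB_step (res, none)) = res ++ pvComb l) ∧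
    (∀ (res : List String) (k : Nat),
      pmB_flush (l.foldl pmB_step (res, some ("." ++ pvZstr k))) =
        res ++ ("." ++ pvZstr (k + pvRun l)) :: pvComb (l.drop (pvRun l))) := by
  intro n
  induction n with
  | zero =>
    intro l hl
    have : l = [] := List.length_eq_zero_iff.mp (Nat.le_zero.mp hl)
    subst this
    constructor
    · intro res; simp [pmB_flush, pvComb]
    · intro res k; simp [pmB_flush, pvComb, pvRun, List.foldl]
  | succ n ih =>
    intro l hl
    cases l with
    | nil =>
      constructor
      · intro res; simp [pmB_flush, pvComb]
      · intro res k; simp [pmB_flush, pvComb, pvRun, List.foldl]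
    | cons t r =>
      have hr : r.length ≤ n := by simpa using Nat.succ_le_succ_iff.mp hl
      constructor
      · intro res
        by_cases hdot : t = "."
        · subst hdot
          rw [List.foldl_cons, pmB_step_dot_none]
          have hstep := (ih r hr).2 res 0
          rw [pvZstr_zero, String.append_empty] at hstep
          rw [hstep]
          simp [pvComb]
        · by_cases hz : t = "0"
          · subst hz
            rw [List.foldl_cons, pmB_step_other_none res "0" hdot]
            rw [(ih r hr).1 (res ++ ["0"])]
            simp [pvComb]
          · rw [List.foldl_cons, pmB_step_other_none res t hdot]
            rw [(ih r hr).1 (res ++ [t])]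
            simp [pvComb, hdot]
      · intro res k
        by_cases hdot : t = "."
        · subst hdot
          rw [List.foldl_cons, pmB_step_dot_some]
          have hstep := (ih r hr).2 (res ++ ["." ++ pvZstr k]) 0
          rw [pvZstr_zero, String.append_empty] at hstep
          rw [hstep]
          have hrun : pvRun ("." :: r) = 0 := by simp [pvRun]
          rw [hrun]
          simp [pvComb]
        · by_cases hz : t = "0"
          · subst hz
            rw [List.foldl_cons, pmB_step_zero_some]
            have hb : ("." ++ pvZstr k) ++ "0" = "." ++ pvZstr (k + 1) := by
              rw [pvZstr_succ, String.append_assoc]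
            rw [hb, (ih r hr).2 res (k + 1)]
            have hrun : pvRun ("0" :: r) = pvRun r + 1 := by simp [pvRun]
            rw [hrun]
            have hk : k + 1 + pvRun r = k + (pvRun r + 1) := by omega
            rw [hk]
            simp
          · rw [List.foldl_cons, pmB_step_other_some res _ t hdot hz]
            rw [(ih r hr).1 (res ++ ["." ++ pvZstr k] ++ [t])]
            have hrun : pvRun (t :: r) = 0 := by simp [pvRun, hz]
            rw [hrun]
            simp [pvComb, hdot]

theorem pmB_eq_comb (tokens : List String) : parse_milliseconds_alt tokens = pvComb tokens := by
  have := (pmB_inv tokens.length tokens (le_refl _)).1 []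
  simpa [parse_milliseconds_alt] using this

-- A's inner zero-counting loop counts the leading "0"-run of the suffix after i
theorem pmA_zeros_eq (tokens : List String) : ∀ i, pmA_zeros tokens i = pvRun (tokens.drop (i + 1)) := by
  have H : ∀ (n : Nat) (i : Nat), tokens.length - i ≤ n → pmA_zeros tokens i = pvRun (tokens.drop (i + 1)) := by
    intro n
    induction n with
    | zero =>
      intro i hi
      have hlen : tokens.length ≤ i := by omega
      rw [pmA_zeros]
      rw [dif_neg (by omega)]
      rw [List.drop_eq_nil_of_le (by omega)]
      rfl
    | succ n ih =>
      intro i hi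
      rw [pmA_zeros]
      by_cases h : i + 1 < tokens.length ∧ tokens.getD (i + 1) "" = "0"
      · rw [dif_pos h]
        rw [ih (i + 1) (by omega)]
        rw [List.drop_eq_getElem_cons h.1]
        have : tokens[i + 1] = "0" := by
          have := h.2; rwa [List.getD_eq_getElem tokens "" h.1] at this
        simp [pvRun, this]
      · rw [dif_neg h]
        by_cases hlt : i + 1 < tokens.length
        · rw [List.drop_eq_getElem_cons hlt]
          have hne : tokens[i + 1] ≠ "0" := by
            intro hc
            exact h ⟨hlt, by rw [List.getD_eq_getElem tokens "" hlt]; exact hc⟩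
          simp [pvRun, hne]
        · rw [List.drop_eq_nil_of_le (by omega)]
          rfl
  intro i; exact H (tokens.length - i) i (le_refl _)

-- A's outer loop appends pvComb of the remaining suffix
theorem pmA_loop_eq (tokens : List String) : ∀ (n i : Nat) (res : List String), tokens.length - i ≤ n →
    pmA_loop tokens i res = res ++ pvComb (tokens.drop i) := by
  intro n
  induction n with
  | zero =>
    intro i res hi
    rw [pmA_loop, dif_neg (by omega), List.drop_eq_nil_of_le (by omega)]
    simp [pvComb]
  | succ n ih =>
    intro i res hi
    rw [pmA_loop]
    by_cases h : i < tokens.length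
    · rw [dif_pos h]
      have hdrop : tokens.drop i = tokens[i] :: tokens.drop (i + 1) := List.drop_eq_getElem_cons h
      have hget : tokens.getD i "" = tokens[i] := List.getD_eq_getElem tokens "" h
      by_cases hdot : tokens[i] = "."
      · rw [if_pos (hget.trans hdot)]
        have hz : pmA_zeros tokens i = pvRun (tokens.drop (i + 1)) := pmA_zeros_eq tokens i
        set z := pmA_zeros tokens i with hzdef
        have hzle : z ≤ tokens.length - (i + 1) := by
          rw [hz]
          have := pvRun_le (tokens.drop (i + 1))
          simpa using this
        rw [ih (i + z + 1) _ (by omega)]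
        rw [hdrop]
        rw [pvComb, if_pos hdot, ← hz]
        have hdd : (tokens.drop (i + 1)).drop z = tokens.drop (i + z + 1) := by
          rw [List.drop_drop]; congr 1; omega
        rw [hdd]
        have helem : ∀ m : Nat, (if m > 0 then "." ++ String.join (List.replicate m "0") else ".") = "." ++ pvZstr m := by
          intro m
          cases m with
          | zero => rw [if_neg (by omega), pvZstr_zero, String.append_empty]
          | succ m => rw [if_pos (by omega)]; rfl
        rw [helem z]
        simp
      · rw [if_neg (by rw [hget]; exact hdot)]
        rw [ih (i + 1) _ (by omega)]
        rw [hdrop, pvComb, if_neg hdot, hget]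
        simp
    · rw [dif_neg h, List.drop_eq_nil_of_le (by omega)]
      simp [pvComb]

-- ===== VERDICT (by name: the statement is the Claim_ definition above) =====
theorem parse_milliseconds_spec : Claim_equal_parse_milliseconds := by
  intro tokens _
  show parse_milliseconds tokens = parse_milliseconds_alt tokens
  rw [parse_milliseconds, pmA_loop_eq tokens tokens.length 0 [] (by omega), pmB_eq_comb]
  simp
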